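-- pv_equiv track=rewrite | github.com/lazogrowth-glitch/vocalype | vocalype-brain/scripts/generate_safe_patch.py | _classify_safety
-- ===== SOURCE A (Python) =====
-- FORBIDDEN_PATTERNS = [
--     "backend/",
--     "src-tauri/",
--     "src/lib/auth/client.ts",
--     "src/lib/license/client.ts",
--     "payment",
--     "billing",
--     "security",
--     "translation.json",
-- ]
--
-- DOCS_SAFE_PATTERNS = [
--     "README",
--     "CHANGELOG",
--     "CONTRIBUTING",
--     "LICENSE",
--     ".md",
--     "docs/",
-- ]
--
-- FRONTEND_SAFE_FILES = {
--     "src/App.tsx",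
--     "src/components/AccessibilityPermissions.tsx",
--     "src/components/MachineStatusBar.tsx",
--     "src/components/auth/AuthPortal.tsx",
--     "src/components/onboarding/FirstRunDownload.tsx",
--     "src/hooks/useAuthFlow.ts",
-- }
--
-- BRAIN_PREFIX = "vocalype-brain/"
--
-- def _classify_safety(files: list[str], task_type: str) -> tuple[str, str]:
--     """Return (safety_class, reason).
--
--     safety_class is one of:
--       brain_safe           — only vocalype-brain/ files
--       docs_safe            — only README/docs/markdown files
--       product_proposal_only — product files in scope but not forbidden
--       unsafe               — forbidden scope detected
--     """
--     if not files:
--         if task_type in ("planning_only", "measurement_task"):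
--             return (
--                 "brain_safe",
--                 "No product files targeted. Task is planning or measurement only; "
--                 "changes are limited to vocalype-brain/ outputs.",
--             )
--         return (
--             "product_proposal_only",
--             "No explicit target files found. Treating as proposal only until "
--             "approved files are confirmed in codex_task.md.",
--         )
--
--     # Forbidden check is highest priority
--     forbidden = [f for f in files if any(pat in f for pat in FORBIDDEN_PATTERNS)]
--     if forbidden:
--         preview = ", ".join(forbidden[:3])
--         return "unsafe", f"Target files include forbidden scope: {preview}"
--
--     # All files inside vocalype-brain/
--     brain_only = all(BRAIN_PREFIX in f or f.startswith("vocalype-brain/") for f in files)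
--     if brain_only:
--         return "brain_safe", "All target files are inside vocalype-brain/."
--
--     # All non-Brain files are docs-safe
--     non_brain = [f for f in files if BRAIN_PREFIX not in f and not f.startswith("vocalype-brain/")]
--     docs_only = all(any(pat in f for pat in DOCS_SAFE_PATTERNS) for f in non_brain)
--     if docs_only:
--         return "docs_safe", "Non-Brain target files are documentation or markdown only."
--
--     # Product files in scope — check against safe set
--     product = [f for f in non_brain if not any(pat in f for pat in DOCS_SAFE_PATTERNS)]
--     outside_safe = [f for f in product if f not in FRONTEND_SAFE_FILES]
--     if outside_safe:
--         preview = ", ".join(outside_safe[:3])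
--         return (
--             "product_proposal_only",
--             f"Product files outside the approved frontend-safe set: {preview}. "
--             "Proposal only — requires manual inspection before application.",
--         )
--
--     return (
--         "product_proposal_only",
--         "Product code is involved. Patch is a text proposal only. "
--         "Requires manual approval before any file is touched.",
--     )
-- ===== SOURCE B (Python) =====
-- FORBIDDEN_PATTERNS = [
--     "backend/",
--     "src-tauri/",
--     "src/lib/auth/client.ts",
--     "src/lib/license/client.ts",
--     "payment",
--     "billing",
--     "security",
--     "translation.json",
-- ]
--
-- DOCS_SAFE_PATTERNS = [
--     "README",
--     "CHANGELOG",
--     "CONTRIBUTING",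
--     "LICENSE",
--     ".md",
--     "docs/",
-- ]
--
-- FRONTEND_SAFE_FILES = {
--     "src/App.tsx",
--     "src/components/AccessibilityPermissions.tsx",
--     "src/components/MachineStatusBar.tsx",
--     "src/components/auth/AuthPortal.tsx",
--     "src/components/onboarding/FirstRunDownload.tsx",
--     "src/hooks/useAuthFlow.ts",
-- }
--
-- BRAIN_PREFIX = "vocalype-brain/"
--
--
-- def _classify_safety(files: list[str], task_type: str) -> tuple[str, str]:
--     if not files:
--         if task_type in ("planning_only", "measurement_task"):
--             return (
--                 "brain_safe",
--                 "No product files targeted. Task is planning or measurement only; "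
--                 "changes are limited to vocalype-brain/ outputs.",
--             )
--         return (
--             "product_proposal_only",
--             "No explicit target files found. Treating as proposal only until "
--             "approved files are confirmed in codex_task.md.",
--         )
--
--     # One pass: classify each file and accumulate state in file order.
--     forbidden = []
--     brain_only = True
--     docs_only = True
--     outside_safe = []
--     for f in files:
--         if any(pat in f for pat in FORBIDDEN_PATTERNS):
--             forbidden.append(f)
--         if BRAIN_PREFIX in f:
--             continue
--         brain_only = False
--         if any(pat in f for pat in DOCS_SAFE_PATTERNS):
--             continue
--         docs_only = False
--         if f not in FRONTEND_SAFE_FILES: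
--             outside_safe.append(f)
--
--     if forbidden:
--         preview = ", ".join(forbidden[:3])
--         return "unsafe", f"Target files include forbidden scope: {preview}"
--     if brain_only:
--         return "brain_safe", "All target files are inside vocalype-brain/."
--     if docs_only:
--         return "docs_safe", "Non-Brain target files are documentation or markdown only."
--     if outside_safe:
--         preview = ", ".join(outside_safe[:3])
--         return (
--             "product_proposal_only",
--             f"Product files outside the approved frontend-safe set: {preview}. "
--             "Proposal only — requires manual inspection before application.",
--         )
--     return (
--         "product_proposal_only",
--         "Product code is involved. Patch is a text proposal only. "
--         "Requires manual approval before any file is touched.",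
--     )
-- ===== Notes on version B (the rewrite author's own statement) =====
-- stated objective: simpler
-- what changed: Replaced A's four separate list comprehensions / all()-scans over files with a single loop that classifies each file once and accumulates the forbidden and outside-safe-set previews and the brain_only/docs_only flags, followed by the same priority decision tree.
import Mathlib
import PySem

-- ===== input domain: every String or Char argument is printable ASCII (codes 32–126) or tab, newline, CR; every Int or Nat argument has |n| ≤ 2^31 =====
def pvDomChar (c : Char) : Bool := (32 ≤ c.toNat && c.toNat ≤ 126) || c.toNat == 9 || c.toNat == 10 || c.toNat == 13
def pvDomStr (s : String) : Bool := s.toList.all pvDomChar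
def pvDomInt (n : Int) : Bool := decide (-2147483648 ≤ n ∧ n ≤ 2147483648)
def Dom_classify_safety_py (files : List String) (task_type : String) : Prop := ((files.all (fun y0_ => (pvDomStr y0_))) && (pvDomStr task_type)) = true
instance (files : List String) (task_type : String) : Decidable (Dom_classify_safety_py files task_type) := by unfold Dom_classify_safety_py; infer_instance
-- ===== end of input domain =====

-- B replaces A's repeated filtering comprehensions and all()-scans with one pass over the
-- files that accumulates the forbidden/outside previews and the two boolean flags (simpler, one traversal).

-- shared module-level constants (same in both Pythons)
def forbiddenPatterns : List String :=
  ["backend/", "src-tauri/", "src/lib/auth/client.ts", "src/lib/license/client.ts",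
   "payment", "billing", "security", "translation.json"]

def docsSafePatterns : List String :=
  ["README", "CHANGELOG", "CONTRIBUTING", "LICENSE", ".md", "docs/"]

def frontendSafeFiles : List String := PySem.Set.ofList
  ["src/App.tsx", "src/components/AccessibilityPermissions.tsx",
   "src/components/MachineStatusBar.tsx", "src/components/auth/AuthPortal.tsx",
   "src/components/onboarding/FirstRunDownload.tsx", "src/hooks/useAuthFlow.ts"]

def brainPrefix : String := "vocalype-brain/"

-- 'any(pat in f for pat in PATTERNS)' — appears verbatim in both Pythons
def isForbidden (f : String) : Bool := forbiddenPatterns.any (fun pat => PySem.Str.isIn pat f)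
def isDocs (f : String) : Bool := docsSafePatterns.any (fun pat => PySem.Str.isIn pat f)
-- 'BRAIN_PREFIX in f' and 'f in FRONTEND_SAFE_FILES'
def isBrain (f : String) : Bool := PySem.Str.isIn brainPrefix f
def isSafe (f : String) : Bool := PySem.Set.contains frontendSafeFiles f

def emptyBrainMsg : String × String :=
  ("brain_safe", "No product files targeted. Task is planning or measurement only; changes are limited to vocalype-brain/ outputs.")
def emptyProposalMsg : String × String :=
  ("product_proposal_only", "No explicit target files found. Treating as proposal only until approved files are confirmed in codex_task.md.")

-- ===== PORT A =====
def classify_safety_py (files : List String) (task_type : String) : String × String :=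
  if files.isEmpty then
    if task_type = "planning_only" || task_type = "measurement_task" then emptyBrainMsg
    else emptyProposalMsg
  else
    let forbidden := files.filter (fun f => isForbidden f)
    if !forbidden.isEmpty then
      ("unsafe", "Target files include forbidden scope: " ++
                   PySem.Str.join ", " (PySem.List.slice forbidden none (some 3)))
    else
      let brain_only := files.all (fun f =>
        isBrain f || PySem.Str.startswith f brainPrefix)
      if brain_only then ("brain_safe", "All target files are inside vocalype-brain/.")
      else
        let non_brain := files.filter (fun f =>
          !isBrain f && !PySem.Str.startswith f brainPrefix)
        let docs_only := non_brain.all (fun f => isDocs f)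
        if docs_only then ("docs_safe", "Non-Brain target files are documentation or markdown only.")
        else
          let product := non_brain.filter (fun f => !isDocs f)
          let outside_safe := product.filter (fun f => !isSafe f)
          if !outside_safe.isEmpty then
            ("product_proposal_only",
             "Product files outside the approved frontend-safe set: " ++
               PySem.Str.join ", " (PySem.List.slice outside_safe none (some 3)) ++
               ". Proposal only — requires manual inspection before application.")
          else
            ("product_proposal_only", "Product code is involved. Patch is a text proposal only. Requires manual approval before any file is touched.")

-- ===== PORT B =====
-- state: (forbidden, brain_only, docs_only, outside_safe), updated per file in order
def altLoop : List String → List String × Bool × Bool × List String → List String × Bool × Bool × List String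
  | [], st => st
  | f :: rest, (forb, brain, docs, outside) =>
    let forb' := if isForbidden f then forb ++ [f] else forb
    if isBrain f then
      altLoop rest (forb', brain, docs, outside)
    else if isDocs f then
      altLoop rest (forb', false, docs, outside)
    else if !isSafe f then
      altLoop rest (forb', false, false, outside ++ [f])
    else
      altLoop rest (forb', false, false, outside)

def classify_safety_py_alt (files : List String) (task_type : String) : String × String :=
  if files.isEmpty then
    if task_type = "planning_only" || task_type = "measurement_task" then emptyBrainMsg
    else emptyProposalMsg
  else
    match altLoop files ([], true, true, []) with
    | (forbidden, brain_only, docs_only, outside_safe) =>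
      if !forbidden.isEmpty then
        ("unsafe", "Target files include forbidden scope: " ++
                     PySem.Str.join ", " (PySem.List.slice forbidden none (some 3)))
      else if brain_only then ("brain_safe", "All target files are inside vocalype-brain/.")
      else if docs_only then ("docs_safe", "Non-Brain target files are documentation or markdown only.")
      else if !outside_safe.isEmpty then
        ("product_proposal_only",
         "Product files outside the approved frontend-safe set: " ++
           PySem.Str.join ", " (PySem.List.slice outside_safe none (some 3)) ++
           ". Proposal only — requires manual inspection before application.")
      else
        ("product_proposal_only", "Product code is involved. Patch is a text proposal only. Requires manual approval before any file is touched.")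

-- ===== PRECONDITION & SPEC =====
def Spec_classify_safety_py (files : List String) (task_type : String) (out : String × String) : Prop := out = classify_safety_py_alt files task_type
instance (files : List String) (task_type : String) (out : String × String) : Decidable (Spec_classify_safety_py files task_type out) := by unfold Spec_classify_safety_py; infer_instance

-- ===== CLAIM (what is proved, stated in full; the proofs are below) =====
def Claim_equal_classify_safety_py : Prop := ∀ (files : List String) (task_type : String), Dom_classify_safety_py files task_type → Spec_classify_safety_py files task_type (classify_safety_py files task_type)

-- ===== LEMMAS AND PROOFS =====

-- 'vocalype-brain/ in f' subsumes 'f.startswith(vocalype-brain/)'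
theorem brain_or_startswith (f : String) :
    (isBrain f || PySem.Str.startswith f brainPrefix) = isBrain f := by
  cases h : PySem.Str.startswith f brainPrefix with
  | false => simp [h]
  | true =>
    have hpre : brainPrefix.toList <+: f.toList :=
      (PySem.Chars.startswith_iff f.toList brainPrefix.toList).mp (by simpa using h)
    have hin : isBrain f = true :=
      (PySem.Str.isIn_iff_infix brainPrefix f).mpr hpre.isInfix
    simp [hin]

theorem not_brain_and (f : String) :
    (!isBrain f && !PySem.Str.startswith f brainPrefix) = !isBrain f := by
  rw [← brain_or_startswith f]
  cases isBrain f <;> cases PySem.Str.startswith f brainPrefix <;> rfl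

theorem altLoop_spec (fs : List String) (forb : List String) (brain docs : Bool) (outside : List String) :
    altLoop fs (forb, brain, docs, outside) =
      (forb ++ fs.filter (fun f => isForbidden f),
       brain && fs.all (fun f => isBrain f),
       docs && fs.all (fun f => isBrain f || isDocs f),
       outside ++ fs.filter (fun f => !isBrain f && !isDocs f && !isSafe f)) := by
  induction fs generalizing forb brain docs outside with
  | nil => simp [altLoop]
  | cons f rest ih =>
    by_cases hf : isForbidden f = true <;>
    by_cases hb : isBrain f = true <;>
    by_cases hd : isDocs f = true <;>
    by_cases hs : isSafe f = true <;>
    simp [altLoop, hf, hb, hd, hs, ih, List.filter_cons, Bool.and_assoc]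

theorem filter_all_docs (fs : List String) :
    ((fs.filter (fun f => !isBrain f)).all (fun f => isDocs f)) =
      fs.all (fun f => isBrain f || isDocs f) := by
  induction fs with
  | nil => rfl
  | cons f rest ih =>
    by_cases hb : isBrain f = true <;>
      simp [List.filter_cons, List.all_cons, hb, ih]

theorem filter_filter_outside (fs : List String) :
    (((fs.filter (fun f => !isBrain f)).filter (fun f => !isDocs f)).filter (fun f => !isSafe f)) =
      fs.filter (fun f => !isBrain f && !isDocs f && !isSafe f) := by
  simp [List.filter_filter, Bool.and_comm, Bool.and_left_comm]

-- ===== VERDICT (by name: the statement is the Claim_ definition above) =====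
theorem classify_safety_py_spec : Claim_equal_classify_safety_py := by
  intro files task_type _
  unfold Spec_classify_safety_py classify_safety_py classify_safety_py_alt
  by_cases he : files.isEmpty
  · simp [he]
  · simp only [he, if_false, Bool.false_eq_true, altLoop_spec, List.nil_append, Bool.true_and]
    have hbrain : (files.all (fun f => isBrain f || PySem.Str.startswith f brainPrefix)) =
        files.all (fun f => isBrain f) := by
      rw [show (fun f => isBrain f || PySem.Str.startswith f brainPrefix) = (fun f => isBrain f)
            from funext brain_or_startswith]
    have hnb : (files.filter (fun f => !isBrain f && !PySem.Str.startswith f brainPrefix)) =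
        files.filter (fun f => !isBrain f) := by
      rw [show (fun f => !isBrain f && !PySem.Str.startswith f brainPrefix) = (fun f => !isBrain f)
            from funext not_brain_and]
    rw [hbrain, hnb, filter_all_docs, filter_filter_outside]
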